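-- pv_equiv track=rewrite | github.com/cnocito/bigdatabitcoinlinkedin | trainmodel.py | ScoreConfusionMatrix
-- ===== SOURCE A (Python) =====
-- def ScoreConfusionMatrix(m):
--     i = 0
--     j = 0
--     score = 0
--     for row in m:
--         for item in row:
--             if j == 1:
--                 score += 0 * item
--             elif i == 1:
--                 score += 0 * item
--             elif i == j:
--                 score += 1 * item
--             else:
--                 score += (-1) * item
--             j += 1
--         j = 0
--         i += 1
--     return score
-- ===== SOURCE B (Python) =====
-- def ScoreConfusionMatrix(m):
--     # 2*D - S: every active cell (row != 1, col != 1) contributes -item,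
--     # diagonal cells contribute +item, i.e. 2*item more than -item.
--     S = sum(item for i, row in enumerate(m) if i != 1
--                  for j, item in enumerate(row) if j != 1)
--     D = sum(row[i] for i, row in enumerate(m) if i != 1 and len(row) > i)
--     return 2 * D - S
-- ===== Notes on version B (the rewrite author's own statement) =====
-- stated objective: alternative
-- what changed: Replaces A's single per-cell classifying loop over mutable (i, j, score) by two separate aggregates — the sum S of all cells outside row 1 and column 1, and the diagonal sum D over rows other than row 1 — combined as 2*D - S.
import Mathlib
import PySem

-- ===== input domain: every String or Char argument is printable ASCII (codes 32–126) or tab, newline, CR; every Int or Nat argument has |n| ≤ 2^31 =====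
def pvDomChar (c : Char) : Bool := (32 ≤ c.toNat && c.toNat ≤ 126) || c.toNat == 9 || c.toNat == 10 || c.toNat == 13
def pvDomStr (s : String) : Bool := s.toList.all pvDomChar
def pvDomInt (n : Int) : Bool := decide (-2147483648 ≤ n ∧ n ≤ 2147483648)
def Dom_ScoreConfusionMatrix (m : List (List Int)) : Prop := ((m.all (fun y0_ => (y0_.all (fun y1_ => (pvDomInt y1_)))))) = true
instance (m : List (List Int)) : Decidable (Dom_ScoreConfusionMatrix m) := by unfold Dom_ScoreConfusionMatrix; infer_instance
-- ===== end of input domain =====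

-- B replaces A's per-cell classifying loop by two aggregates (submatrix sum S and diagonal sum D) combined as 2*D - S (objective: alternative decomposition).

-- ===== PORT A =====
-- state is (i, j, score), exactly A's three mutable variables
def ScoreConfusionMatrix (m : List (List Int)) : Int :=
  (m.foldl (fun (s : Int × Int × Int) row =>
      let s2 := row.foldl (fun (t : Int × Int × Int) item =>
          let score :=
            if t.2.1 = 1 then t.2.2 + 0 * item
            else if t.1 = 1 then t.2.2 + 0 * item
            else if t.1 = t.2.1 then t.2.2 + 1 * item
            else t.2.2 + (-1) * item
          (t.1, t.2.1 + 1, score)) s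
      (s2.1 + 1, 0, s2.2.2)) (0, 0, 0)).2.2

-- ===== PORT B =====
def ScoreConfusionMatrix_alt (m : List (List Int)) : Int :=
  let S := (PySem.List.enumerate m 0).foldl (fun acc p =>
      if p.1 ≠ 1 then
        (PySem.List.enumerate p.2 0).foldl (fun a q => if q.1 ≠ 1 then a + q.2 else a) acc
      else acc) 0
  let D := (PySem.List.enumerate m 0).foldl (fun acc p =>
      if p.1 ≠ 1 ∧ p.1 < (p.2.length : Int) then acc + PySem.List.pyGetD p.2 p.1 0
      else acc) 0
  2 * D - S

-- ===== PRECONDITION & SPEC =====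
def Spec_ScoreConfusionMatrix (m : List (List Int)) (out : Int) : Prop := out = ScoreConfusionMatrix_alt m
instance (m : List (List Int)) (out : Int) : Decidable (Spec_ScoreConfusionMatrix m out) := by unfold Spec_ScoreConfusionMatrix; infer_instance

-- ===== CLAIM (what is proved, stated in full; the proofs are below) =====
def Claim_equal_ScoreConfusionMatrix : Prop := ∀ (m : List (List Int)), Dom_ScoreConfusionMatrix m → Spec_ScoreConfusionMatrix m (ScoreConfusionMatrix m)

-- ===== LEMMAS AND PROOFS =====

-- A's per-cell contribution of one row, starting at column index j
def cA (i j : Int) : List Int → Int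
  | [] => 0
  | x :: xs =>
    (if j = 1 then 0 * x else if i = 1 then 0 * x else if i = j then 1 * x else (-1) * x)
      + cA i (j + 1) xs

-- A's total over rows starting at row index i
def rowsA (i : Int) : List (List Int) → Int
  | [] => 0
  | r :: rs => cA i 0 r + rowsA (i + 1) rs

-- B's per-row "S" contribution starting at column index j
def sJ (j : Int) : List Int → Int
  | [] => 0
  | x :: xs => (if j ≠ 1 then x else 0) + sJ (j + 1) xs

def sS (i : Int) : List (List Int) → Int
  | [] => 0
  | r :: rs => (if i ≠ 1 then sJ 0 r else 0) + sS (i + 1) rs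

def dIdx (i j : Int) : List Int → Int
  | [] => 0
  | x :: xs => (if i = j then x else 0) + dIdx i (j + 1) xs

def dD (i : Int) : List (List Int) → Int
  | [] => 0
  | r :: rs =>
    (if i ≠ 1 ∧ i < (r.length : Int) then PySem.List.pyGetD r i 0 else 0) + dD (i + 1) rs

theorem innerA_eq (row : List Int) : ∀ (i j sc : Int),
    (row.foldl (fun (t : Int × Int × Int) item =>
        let score :=
          if t.2.1 = 1 then t.2.2 + 0 * item
          else if t.1 = 1 then t.2.2 + 0 * item
          else if t.1 = t.2.1 then t.2.2 + 1 * item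
          else t.2.2 + (-1) * item
        (t.1, t.2.1 + 1, score)) (i, j, sc))
      = (i, j + (row.length : Int), sc + cA i j row) := by
  induction row with
  | nil => intro i j sc; simp [cA]
  | cons x xs ih =>
    intro i j sc
    simp only [List.foldl_cons, ih, cA, Prod.mk.injEq]
    refine ⟨trivial, by simp only [List.length_cons]; push_cast; ring, ?_⟩
    split_ifs <;> ring

theorem outerA_eq (m : List (List Int)) : ∀ (i sc : Int),
    (m.foldl (fun (s : Int × Int × Int) row =>
        let s2 := row.foldl (fun (t : Int × Int × Int) item =>
            let score :=
              if t.2.1 = 1 then t.2.2 + 0 * item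
              else if t.1 = 1 then t.2.2 + 0 * item
              else if t.1 = t.2.1 then t.2.2 + 1 * item
              else t.2.2 + (-1) * item
            (t.1, t.2.1 + 1, score)) s
        (s2.1 + 1, 0, s2.2.2)) (i, 0, sc)).2.2
      = sc + rowsA i m := by
  induction m with
  | nil => intro i sc; simp [rowsA]
  | cons r rs ih =>
    intro i sc
    simp only [List.foldl_cons, innerA_eq, rowsA, ih]
    ring

theorem sFold_eq (m : List (List Int)) : ∀ (i acc : Int),
    ((PySem.List.enumerate m i).foldl (fun acc p =>
        if p.1 ≠ 1 then
          (PySem.List.enumerate p.2 0).foldl (fun a q => if q.1 ≠ 1 then a + q.2 else a) acc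
        else acc) acc)
      = acc + sS i m := by
  have inner : ∀ (r : List Int) (j a : Int),
      ((PySem.List.enumerate r j).foldl (fun a q => if q.1 ≠ 1 then a + q.2 else a) a)
        = a + sJ j r := by
    intro r
    induction r with
    | nil => intro j a; simp [PySem.List.enumerate_nil, sJ]
    | cons x xs ih =>
      intro j a
      simp only [PySem.List.enumerate_cons, List.foldl_cons, ih, sJ]
      split_ifs <;> ring
  induction m with
  | nil => intro i acc; simp [PySem.List.enumerate_nil, sS]
  | cons r rs ih =>
    intro i acc
    simp only [PySem.List.enumerate_cons, List.foldl_cons, ih, sS]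
    split_ifs with h
    · rw [inner]; ring
    · ring

theorem dFold_eq (m : List (List Int)) : ∀ (i acc : Int),
    ((PySem.List.enumerate m i).foldl (fun acc p =>
        if p.1 ≠ 1 ∧ p.1 < (p.2.length : Int) then acc + PySem.List.pyGetD p.2 p.1 0
        else acc) acc)
      = acc + dD i m := by
  induction m with
  | nil => intro i acc; simp [PySem.List.enumerate_nil, dD]
  | cons r rs ih =>
    intro i acc
    simp only [PySem.List.enumerate_cons, List.foldl_cons, ih, dD]
    split_ifs <;> ring

theorem dIdx_zero_of_lt (r : List Int) : ∀ (i j : Int), i < j → dIdx i j r = 0 := by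
  induction r with
  | nil => intro i j _; simp [dIdx]
  | cons x xs ih =>
    intro i j h
    simp only [dIdx]
    rw [if_neg (by omega), ih i (j + 1) (by omega)]
    ring

theorem dIdx_eq (r : List Int) : ∀ (i j : Int), j ≤ i →
    dIdx i j r = if i - j < (r.length : Int) then r.getD (i - j).toNat 0 else 0 := by
  induction r with
  | nil => intro i j _; simp [dIdx]
  | cons x xs ih =>
    intro i j hj
    simp only [dIdx]
    by_cases h : i = j
    · subst h
      rw [if_pos rfl, dIdx_zero_of_lt xs i (i + 1) (by omega),
          if_pos (by simp only [List.length_cons]; omega)]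
      simp
    · rw [if_neg h, ih i (j + 1) (by omega)]
      have h1 : i - (j + 1) < (xs.length : Int) ↔ i - j < ((x :: xs).length : Int) := by
        simp only [List.length_cons]; omega
      by_cases h2 : i - (j + 1) < (xs.length : Int)
      · rw [if_pos h2, if_pos (h1.mp h2)]
        have ht : (i - j).toNat = (i - (j + 1)).toNat + 1 := by omega
        simp [ht]
      · rw [if_neg h2, if_neg (fun hc => h2 (h1.mpr hc))]
        ring

theorem cA_one (r : List Int) : ∀ (j : Int), cA 1 j r = 0 := by
  induction r with
  | nil => intro j; simp [cA]
  | cons x xs ih =>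
    intro j
    simp only [cA, ih]
    split_ifs <;> ring

theorem cA_eq (r : List Int) : ∀ (i j : Int), i ≠ 1 →
    cA i j r = 2 * dIdx i j r - sJ j r := by
  induction r with
  | nil => intro i j _; simp [cA, dIdx, sJ]
  | cons x xs ih =>
    intro i j hi
    simp only [cA, dIdx, sJ, ih _ _ hi]
    split_ifs <;> (try ring) <;> exfalso <;> omega

theorem rowsA_eq (m : List (List Int)) : ∀ (i : Int), 0 ≤ i →
    rowsA i m = 2 * dD i m - sS i m := by
  induction m with
  | nil => intro i _; simp [rowsA, dD, sS]
  | cons r rs ih =>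
    intro i hi
    simp only [rowsA, dD, sS, ih (i + 1) (by omega)]
    by_cases h1 : i = 1
    · subst h1
      simp [cA_one]
    · rw [cA_eq r i 0 h1, dIdx_eq r i 0 (by omega)]
      by_cases h2 : i - 0 < (r.length : Int)
      · rw [if_pos h2, if_pos ⟨h1, by omega⟩, if_pos h1,
            PySem.List.pyGetD_eq_getElem r (0:Int) hi (by omega)]
        have : r[i.toNat] = r.getD (i - 0).toNat 0 := by
          rw [List.getD_eq_getElem _ _ (by omega)]
          congr 1; omega
        rw [this]; ring
      · rw [if_neg h2, if_neg (by intro hc; exact h2 (by omega)), if_pos h1]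
        ring

-- ===== VERDICT (by name: the statement is the Claim_ definition above) =====
theorem ScoreConfusionMatrix_spec : Claim_equal_ScoreConfusionMatrix := by
  intro m _
  unfold Spec_ScoreConfusionMatrix ScoreConfusionMatrix ScoreConfusionMatrix_alt
  rw [outerA_eq, sFold_eq, dFold_eq, rowsA_eq m 0 (by omega)]
  ring
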